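-- pv_equiv track=rewrite | github.com/laoyu17/Level2-Feature | src/l2_features/schema.py | detect_depth_levels
-- ===== SOURCE A (Python) =====
-- DEPTH_PREFIXES = ("bid_px", "bid_sz", "ask_px", "ask_sz")
--
-- def detect_depth_levels(columns: list[str] | tuple[str, ...]) -> int:
--     """从列名推断当前快照支持的盘口档位数。"""
--
--     column_set = set(columns)
--     depth = 1
--     level = 2
--     while True:
--         required = {f"{prefix}_{level}" for prefix in DEPTH_PREFIXES}
--         if required.issubset(column_set):
--             depth = level
--             level += 1
--             continue
--         break
--     return depth
-- ===== SOURCE B (Python) =====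
-- DEPTH_PREFIXES = ("bid_px", "bid_sz", "ask_px", "ask_sz")
--
-- def detect_depth_levels(columns):
--     # Parse every column of the form "<prefix>_<digits>" (no leading zero) into
--     # its integer level, tallying which of the four prefixes appear per level;
--     # then walk the sorted complete levels, extending the consecutive run
--     # 2, 3, ... from a depth of 1.
--     seen = {}
--     for col in columns:
--         for prefix in DEPTH_PREFIXES:
--             head = prefix + "_"
--             if col.startswith(head):
--                 tail = col[len(head):]
--                 if tail.isdigit() and tail[0] != "0":
--                     seen.setdefault(int(tail), set()).add(prefix)
--     depth = 1
--     for lv in sorted(n for n, ps in seen.items() if n >= 2 and len(ps) == 4):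
--         if lv != depth + 1:
--             break
--         depth = lv
--     return depth
-- ===== Notes on version B (the rewrite author's own statement) =====
-- stated objective: alternative
-- what changed: Instead of a while-loop probing generated key names level by level against the column set, B parses each column '<prefix>_<digits>' into its integer level in one tally pass, then walks the sorted list of complete levels extending the consecutive run 2, 3, ... from depth 1.
import Mathlib
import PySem

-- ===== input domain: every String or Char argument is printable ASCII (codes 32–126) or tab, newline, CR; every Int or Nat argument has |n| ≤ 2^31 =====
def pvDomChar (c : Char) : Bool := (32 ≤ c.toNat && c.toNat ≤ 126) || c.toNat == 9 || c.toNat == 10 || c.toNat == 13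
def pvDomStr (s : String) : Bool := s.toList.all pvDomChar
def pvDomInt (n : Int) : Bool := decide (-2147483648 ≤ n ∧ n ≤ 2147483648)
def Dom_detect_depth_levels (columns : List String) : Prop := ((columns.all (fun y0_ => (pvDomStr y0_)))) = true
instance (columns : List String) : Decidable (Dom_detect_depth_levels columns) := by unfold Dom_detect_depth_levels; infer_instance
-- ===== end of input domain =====

-- B replaces A's probe-generated-keys-per-level while-loop by a parse-and-tally pass
-- (each column "<prefix>_<digits>" is parsed to its integer level) followed by a
-- consecutive-run walk over the SORTED complete levels (objective: alternative).

-- DEPTH_PREFIXES module constant (shared by both ports, as in the Python sources)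
def pvPrefixes : List String := ["bid_px", "bid_sz", "ask_px", "ask_sz"]

-- ===== PORT A =====
-- the unbounded 'while True' loop; fuel 4 * columns.length + 1 always suffices: each
-- completed level consumes four fresh distinct column names, so the loop body cannot
-- succeed more than columns.length times
def pvALoop (cset : PySem.Set String) (depth level : Int) : Nat → Int
  | 0 => depth
  | fuel+1 =>
    let required : PySem.Set String :=
      PySem.Set.ofList (pvPrefixes.map (fun p => p ++ "_" ++ PySem.Int.toStr level))
    if PySem.Set.issubset required cset then pvALoop cset level (level + 1) fuel
    else depth

def detect_depth_levels (columns : List String) : Int :=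
  pvALoop (PySem.Set.ofList columns) 1 2 (4 * columns.length + 1)

-- ===== PORT B =====
-- port of int(tail): exact on nonempty all-digit strings, which is what the
-- tail.isdigit() guard in Source B admits
def pvIntOfDigits (s : String) : Int :=
  s.toList.foldl (fun a c => 10 * a + ((c.toNat : Int) - 48)) 0

-- the parsing pass: seen.setdefault(int(tail), set()).add(prefix); Python's
-- short-circuit 'tail.isdigit() and tail[0] != "0"' is the nested condition
-- (tail[0] is only read when tail is nonempty)
def pvBIndex (columns : List String) : PySem.Dict Int (PySem.Set String) :=
  columns.foldl (fun d col =>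
    pvPrefixes.foldl (fun d prefix_ =>
      if PySem.Str.startswith col (prefix_ ++ "_") then
        let tail := PySem.Str.slice col (some (PySem.Str.len (prefix_ ++ "_")))
        if PySem.Str.strIsdigit tail && !(PySem.Str.pyGet? tail 0 == some '0') then
          PySem.Dict.modify d (pvIntOfDigits tail) [] (fun t => PySem.Set.add t prefix_)
        else d
      else d) d) PySem.Dict.empty

-- sorted(n for n, ps in seen.items() if n >= 2 and len(ps) == 4)
def pvBLevels (columns : List String) : List Int :=
  PySem.List.sorted
    (((PySem.Dict.items (pvBIndex columns)).filter
        (fun kv => decide (2 ≤ kv.1) && (kv.2.length == 4))).map Prod.fst)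
    (fun x => x) false

-- the for-loop with break over the sorted complete levels
def pvBScan : List Int → Int → Int
  | [], depth => depth
  | lv :: rest, depth => if lv ≠ depth + 1 then depth else pvBScan rest lv

def detect_depth_levels_alt (columns : List String) : Int :=
  pvBScan (pvBLevels columns) 1

-- ===== PRECONDITION & SPEC =====
def Spec_detect_depth_levels (columns : List String) (out : Int) : Prop := out = detect_depth_levels_alt columns
instance (columns : List String) (out : Int) : Decidable (Spec_detect_depth_levels columns out) := by unfold Spec_detect_depth_levels; infer_instance

-- ===== CLAIM (what is proved, stated in full; the proofs are below) =====
def Claim_equal_detect_depth_levels : Prop := ∀ (columns : List String), Dom_detect_depth_levels columns → Spec_detect_depth_levels columns (detect_depth_levels columns)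

-- ===== LEMMAS AND PROOFS =====

-- ---- generic string lemmas ----
lemma pv_sw (c h : String) : PySem.Str.startswith c h = true ↔ h.toList <+: c.toList := by
  simp [PySem.Str.startswith_eq, PySem.Chars.startswith_iff]

lemma pv_slice_toList (c h : String) :
    (PySem.Str.slice c (some (PySem.Str.len h))).toList = c.toList.drop h.toList.length := by
  rw [PySem.Str.toList_slice, PySem.Chars.slice_eq_listSlice, PySem.Str.len_eq]
  rw [PySem.List.slice_from (xs := c.toList) (a := (h.toList.length : Int)) (by positivity)]
  simp

lemma pv_split (c h : String) (hs : PySem.Str.startswith c h = true) :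
    c = h ++ PySem.Str.slice c (some (PySem.Str.len h)) := by
  rw [pv_sw] at hs
  obtain ⟨t, ht⟩ := hs
  apply String.toList_inj.mp
  rw [String.toList_append, pv_slice_toList, ← ht, List.drop_left]

lemma pv_sw_append (h s : String) : PySem.Str.startswith (h ++ s) h = true := by
  rw [pv_sw, String.toList_append]
  exact List.prefix_append _ _

lemma pv_append_cancel {h s t : String} (e : h ++ s = h ++ t) : s = t := by
  apply String.toList_inj.mp
  have := congrArg String.toList e
  rw [String.toList_append, String.toList_append] at this
  exact List.append_cancel_left this

-- ---- decimal-numeral facts (Nat.toDigits 10 = Python's str on naturals) ----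
lemma pv_tdc_step (b f n : Nat) (l : List Char) :
    Nat.toDigitsCore b (f+1) n l =
      if n / b = 0 then (n % b).digitChar :: l
      else Nat.toDigitsCore b f (n / b) ((n % b).digitChar :: l) := rfl

lemma pv_tdc_acc (b : Nat) : ∀ (f : Nat) (n : Nat) (l : List Char),
    Nat.toDigitsCore b f n l = Nat.toDigitsCore b f n [] ++ l := by
  intro f
  induction f with
  | zero => intro n l; rfl
  | succ g ih =>
    intro n l
    rw [pv_tdc_step, pv_tdc_step]
    split_ifs with h
    · simp
    · rw [ih (n/b) ((n % b).digitChar :: l), ih (n/b) [(n % b).digitChar]]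
      simp

lemma pv_tdc_fuel (b : Nat) (hb : 2 ≤ b) : ∀ (n f f' : Nat), n < f → n < f' →
    Nat.toDigitsCore b f n [] = Nat.toDigitsCore b f' n [] := by
  intro n
  induction n using Nat.strong_induction_on with
  | _ n ih =>
    intro f f' hf hf'
    obtain ⟨g, rfl⟩ : ∃ g, f = g + 1 := ⟨f - 1, by omega⟩
    obtain ⟨g', rfl⟩ : ∃ g', f' = g' + 1 := ⟨f' - 1, by omega⟩
    rw [pv_tdc_step, pv_tdc_step]
    split_ifs with h
    · rfl
    · have hn : 0 < n := Nat.pos_of_ne_zero (fun h0 => h (by simp [h0]))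
      have hdiv : n / b < n := Nat.div_lt_self hn (by omega)
      rw [pv_tdc_acc, pv_tdc_acc b g', ih (n/b) hdiv g g' (by omega) (by omega)]

lemma pv_toDigits_lt (d : Nat) (h : d < 10) : Nat.toDigits 10 d = [d.digitChar] := by
  have e : Nat.toDigits 10 d = Nat.toDigitsCore 10 (d+1) d [] := rfl
  rw [e, pv_tdc_step, if_pos (by omega), Nat.mod_eq_of_lt h]

lemma pv_toDigits_ge (d : Nat) (h : 10 ≤ d) :
    Nat.toDigits 10 d = Nat.toDigits 10 (d / 10) ++ [(d % 10).digitChar] := by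
  obtain ⟨g, rfl⟩ : ∃ g, d = g + 1 := ⟨d - 1, by omega⟩
  calc Nat.toDigits 10 (g+1) = Nat.toDigitsCore 10 (g+2) (g+1) [] := rfl
    _ = Nat.toDigitsCore 10 (g+1) ((g+1) / 10) [((g+1) % 10).digitChar] := by
          rw [pv_tdc_step, if_neg (by omega)]
    _ = Nat.toDigitsCore 10 (g+1) ((g+1) / 10) [] ++ [((g+1) % 10).digitChar] :=
          pv_tdc_acc 10 (g+1) _ _
    _ = Nat.toDigits 10 ((g+1) / 10) ++ [((g+1) % 10).digitChar] := by
          rw [pv_tdc_fuel 10 (by omega) ((g+1)/10) (g+1) ((g+1)/10 + 1)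
            (Nat.div_lt_self (by omega) (by omega)) (by omega)]
          rfl

lemma pv_char_eq_of_toNat {a b : Char} (h : a.toNat = b.toNat) : a = b :=
  Char.ext (UInt32.toNat_inj.mp h)

lemma pv_digitChar_toNat (k : Nat) (h : k < 10) : (Nat.digitChar k).toNat = k + 48 := by
  interval_cases k <;> decide

lemma pv_digitChar_isdigit (k : Nat) (h : k < 10) :
    PySem.Chars.isdigit (Nat.digitChar k) = true := by
  interval_cases k <;> decide

lemma pv_digitChar_ne_zero (k : Nat) (h1 : 1 ≤ k) (h2 : k < 10) : Nat.digitChar k ≠ '0' := by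
  interval_cases k <;> decide

lemma pv_isdigit_bounds {c : Char} (h : PySem.Chars.isdigit c = true) :
    48 ≤ c.toNat ∧ c.toNat ≤ 57 := by
  simp only [PySem.Chars.isdigit, Bool.and_eq_true, decide_eq_true_eq] at h
  exact ⟨h.1, h.2⟩

lemma pv_digitChar_sub_48 {c : Char} (h : PySem.Chars.isdigit c = true) :
    Nat.digitChar (c.toNat - 48) = c := by
  obtain ⟨h1, h2⟩ := pv_isdigit_bounds h
  apply pv_char_eq_of_toNat
  rw [pv_digitChar_toNat _ (by omega)]
  omega

-- the value of a digit string (proof-side mirror of pvIntOfDigits, on Nat)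
def pvValN (cs : List Char) : Nat := cs.foldl (fun a c => 10 * a + (c.toNat - 48)) 0

lemma pv_valN_snoc (cs : List Char) (c : Char) :
    pvValN (cs ++ [c]) = 10 * pvValN cs + (c.toNat - 48) := by
  simp [pvValN]

lemma pv_toDigits_digits (d : Nat) :
    ∀ c ∈ Nat.toDigits 10 d, PySem.Chars.isdigit c = true := by
  induction d using Nat.strong_induction_on with
  | _ d ih =>
    by_cases h : d < 10
    · rw [pv_toDigits_lt d h]
      intro c hc
      rw [List.mem_singleton] at hc
      subst hc
      exact pv_digitChar_isdigit d h
    · rw [pv_toDigits_ge d (by omega)]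
      intro c hc
      rcases List.mem_append.mp hc with h1 | h1
      · exact ih (d/10) (Nat.div_lt_self (by omega) (by omega)) c h1
      · rw [List.mem_singleton] at h1
        subst h1
        exact pv_digitChar_isdigit _ (Nat.mod_lt _ (by omega))

lemma pv_toDigits_ne_nil (d : Nat) : Nat.toDigits 10 d ≠ [] := by
  by_cases h : d < 10
  · rw [pv_toDigits_lt d h]; simp
  · rw [pv_toDigits_ge d (by omega)]; simp

lemma pv_toDigits_head (d : Nat) (hd : 1 ≤ d) : (Nat.toDigits 10 d).head? ≠ some '0' := by
  induction d using Nat.strong_induction_on with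
  | _ d ih =>
    by_cases h : d < 10
    · rw [pv_toDigits_lt d h]
      simp only [List.head?_cons, ne_eq, Option.some.injEq]
      exact pv_digitChar_ne_zero d hd h
    · rw [pv_toDigits_ge d (by omega), List.head?_append_of_ne_nil _ (pv_toDigits_ne_nil _)]
      exact ih (d/10) (Nat.div_lt_self (by omega) (by omega)) (by omega)

lemma pv_toDigits_val (d : Nat) : pvValN (Nat.toDigits 10 d) = d := by
  induction d using Nat.strong_induction_on with
  | _ d ih =>
    by_cases h : d < 10
    · rw [pv_toDigits_lt d h]
      simp only [pvValN, List.foldl_cons, List.foldl_nil, Nat.mul_zero, Nat.zero_add]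
      rw [pv_digitChar_toNat d h]
      omega
    · rw [pv_toDigits_ge d (by omega), pv_valN_snoc,
        ih (d/10) (Nat.div_lt_self (by omega) (by omega)),
        pv_digitChar_toNat _ (Nat.mod_lt _ (by omega))]
      omega

lemma pv_toDigits_surj (cs : List Char) (h0 : cs ≠ [])
    (h1 : ∀ c ∈ cs, PySem.Chars.isdigit c = true) (h2 : cs.head? ≠ some '0') :
    Nat.toDigits 10 (pvValN cs) = cs := by
  induction cs using List.reverseRecOn with
  | nil => exact absurd rfl h0
  | append_singleton xs c ih =>
    have hc : PySem.Chars.isdigit c = true := h1 c (by simp)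
    obtain ⟨hb1, hb2⟩ := pv_isdigit_bounds hc
    rcases List.eq_nil_or_concat' xs with rfl | hne
    · have hcz : c ≠ '0' := by
        simp only [List.nil_append, List.head?_cons, ne_eq, Option.some.injEq] at h2
        exact h2
      have hk : c.toNat - 48 < 10 := by omega
      have hk1 : 1 ≤ c.toNat - 48 := by
        rcases Nat.lt_or_ge 48 c.toNat with h | h
        · omega
        · have he : c.toNat = 48 := by omega
          exact absurd (pv_char_eq_of_toNat (by rw [he]; rfl)) hcz
      simp only [List.nil_append, pvValN, List.foldl_cons, List.foldl_nil, Nat.mul_zero,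
        Nat.zero_add]
      rw [pv_toDigits_lt _ hk, pv_digitChar_sub_48 hc]
    · have hxs0 : xs ≠ [] := by rcases hne with ⟨_, _, rfl⟩; simp
      have hh : (xs ++ [c]).head? = xs.head? := List.head?_append_of_ne_nil _ hxs0
      have ihh := ih hxs0 (fun x hx => h1 x (by simp [hx])) (by rw [hh] at h2; exact h2)
      have hv1 : 1 ≤ pvValN xs := by
        by_contra hv
        have hz : pvValN xs = 0 := by omega
        rw [hz, pv_toDigits_lt 0 (by omega)] at ihh
        have : xs.head? = some '0' := by rw [← ihh]; rfl
        rw [hh] at h2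
        exact h2 this
      rw [pv_valN_snoc]
      have hk : c.toNat - 48 < 10 := by omega
      rw [pv_toDigits_ge _ (by omega)]
      have e1 : (10 * pvValN xs + (c.toNat - 48)) / 10 = pvValN xs := by omega
      have e2 : (10 * pvValN xs + (c.toNat - 48)) % 10 = c.toNat - 48 := by omega
      rw [e1, e2, ihh, pv_digitChar_sub_48 hc]

-- canonical digit strings (what B's guard admits), and their value
def pvCanon (cs : List Char) : Prop :=
  cs ≠ [] ∧ (∀ c ∈ cs, PySem.Chars.isdigit c = true) ∧ cs.head? ≠ some '0'

lemma pv_int_val_aux : ∀ (cs : List Char) (a : Nat),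
    (∀ c ∈ cs, PySem.Chars.isdigit c = true) →
    cs.foldl (fun x c => 10 * x + ((c.toNat : Int) - 48)) (a : Int)
      = ((cs.foldl (fun x c => 10 * x + (c.toNat - 48)) a : Nat) : Int) := by
  intro cs
  induction cs with
  | nil => intro a _; rfl
  | cons c cs ih =>
    intro a h
    have hb := pv_isdigit_bounds (h c (by simp))
    simp only [List.foldl_cons]
    have e : 10 * (a : Int) + ((c.toNat : Int) - 48) = ((10 * a + (c.toNat - 48) : Nat) : Int) := by
      push_cast [Nat.cast_sub hb.1]
      ring
    rw [e, ih _ (fun x hx => h x (by simp [hx]))]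

lemma pv_int_val (s : String) (h : ∀ c ∈ s.toList, PySem.Chars.isdigit c = true) :
    pvIntOfDigits s = (pvValN s.toList : Int) := by
  unfold pvIntOfDigits pvValN
  exact pv_int_val_aux s.toList 0 h

lemma pv_toStr_toList (n : Int) (h : 0 ≤ n) :
    (PySem.Int.toStr n).toList = Nat.toDigits 10 n.toNat := by
  rw [PySem.Int.toList_toStr, PySem.Int.toChars, if_neg (by omega)]

lemma pv_canon_val (cs : List Char) (h : pvCanon cs) :
    1 ≤ pvValN cs ∧ Nat.toDigits 10 (pvValN cs) = cs := by
  obtain ⟨h0, h1, h2⟩ := h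
  have hs := pv_toDigits_surj cs h0 h1 h2
  refine ⟨?_, hs⟩
  by_contra hv
  have hz : pvValN cs = 0 := by omega
  rw [hz, pv_toDigits_lt 0 (by omega)] at hs
  exact h2 (by rw [← hs]; rfl)

-- B's guard, read as pvCanon of the tail
lemma pv_guard_iff (tail : String) :
    (PySem.Str.strIsdigit tail && !(PySem.Str.pyGet? tail 0 == some '0')) = true
      ↔ pvCanon tail.toList := by
  rw [Bool.and_eq_true, PySem.Str.strIsdigit_eq]
  unfold PySem.Chars.strIsdigit pvCanon
  have hg : PySem.Str.pyGet? tail 0 = tail.toList.head? := by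
    rw [show (0 : Int) = ((0 : Nat) : Int) from rfl, PySem.Str.pyGet?_natCast]
    cases tail.toList <;> simp
  rw [hg]
  simp only [Bool.and_eq_true, Bool.not_eq_true', beq_eq_false_iff_ne, List.all_eq_true,
    List.isEmpty_eq_false_iff, ne_eq]
  tauto

-- key identity: for a canonical tail, the parsed key is n iff tail is str(n), n ≥ 1
lemma pv_key_iff (tail : String) (hc : pvCanon tail.toList) (n : Int) :
    pvIntOfDigits tail = n ↔ 1 ≤ n ∧ tail = PySem.Int.toStr n := by
  obtain ⟨hv1, hvs⟩ := pv_canon_val tail.toList hc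
  rw [pv_int_val tail hc.2.1]
  constructor
  · rintro rfl
    refine ⟨by exact_mod_cast hv1, ?_⟩
    apply String.toList_inj.mp
    rw [pv_toStr_toList _ (by positivity), Int.toNat_natCast, hvs]
  · rintro ⟨hn, rfl⟩
    have := congrArg pvValN (pv_toStr_toList n (by omega))
    rw [pv_toDigits_val] at this
    rw [this]
    omega

-- str(n) for n ≥ 1 is a canonical digit string
lemma pv_toStr_canon (n : Int) (h : 1 ≤ n) : pvCanon (PySem.Int.toStr n).toList := by
  rw [pv_toStr_toList n (by omega)]
  exact ⟨pv_toDigits_ne_nil _, pv_toDigits_digits _, pv_toDigits_head _ (by omega)⟩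

-- ---- B's parsing pass, characterised ----

-- one inner step of the parsing pass, at a fixed prefix q, through membership of p
set_option maxHeartbeats 2000000 in
lemma pv_step_mem (col q p : String) (n : Int) (d : PySem.Dict Int (PySem.Set String)) :
    p ∈ PySem.Dict.getD
      (if PySem.Str.startswith col (q ++ "_") then
        (let tail := PySem.Str.slice col (some (PySem.Str.len (q ++ "_")))
         if PySem.Str.strIsdigit tail && !(PySem.Str.pyGet? tail 0 == some '0') then
           PySem.Dict.modify d (pvIntOfDigits tail) [] (fun t => PySem.Set.add t q)
         else d)
      else d) n []
    ↔ p ∈ PySem.Dict.getD d n [] ∨ (q = p ∧ 1 ≤ n ∧ col = q ++ "_" ++ PySem.Int.toStr n) := by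
  by_cases hs : PySem.Str.startswith col (q ++ "_") = true
  · rw [if_pos hs]
    have hcol := pv_split col (q ++ "_") hs
    set tail := PySem.Str.slice col (some (PySem.Str.len (q ++ "_"))) with htail
    by_cases hg : (PySem.Str.strIsdigit tail && !(PySem.Str.pyGet? tail 0 == some '0')) = true
    · rw [if_pos hg]
      have hcanon := (pv_guard_iff tail).mp hg
      rw [PySem.Dict.getD_modify]
      split_ifs with he
      · have hkey := (pv_key_iff tail hcanon n).mp he.symm
        rw [PySem.Set.mem_add, ← he]
        constructor
        · rintro (h | rfl)
          · exact Or.inl h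
          · exact Or.inr ⟨rfl, hkey.1, by rw [hcol, hkey.2]⟩
        · rintro (h | ⟨rfl, _, _⟩)
          · exact Or.inl h
          · exact Or.inr rfl
      · constructor
        · exact Or.inl
        · rintro (h | ⟨rfl, hn, hcc⟩)
          · exact h
          · have : tail = PySem.Int.toStr n := pv_append_cancel (hcol.symm.trans hcc)
            exact absurd ((pv_key_iff tail hcanon n).mpr ⟨hn, this⟩).symm he
    · rw [if_neg hg]
      constructor
      · exact Or.inl
      · rintro (h | ⟨rfl, hn, hcc⟩)
        · exact h
        · have ht : tail = PySem.Int.toStr n := pv_append_cancel (hcol.symm.trans hcc)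
          exact absurd ((pv_guard_iff tail).mpr (ht ▸ pv_toStr_canon n hn)) hg
  · rw [if_neg hs]
    constructor
    · exact Or.inl
    · rintro (h | ⟨rfl, _, rfl⟩)
      · exact h
      · exact absurd (pv_sw_append (q ++ "_") (PySem.Int.toStr n)) (by simpa using hs)

-- the whole inner fold over the four prefixes, for p one of them
set_option maxHeartbeats 2000000 in
lemma pv_inner_mem (col p : String) (n : Int) (hp : p ∈ pvPrefixes)
    (d : PySem.Dict Int (PySem.Set String)) :
    p ∈ PySem.Dict.getD
      (pvPrefixes.foldl (fun d prefix_ =>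
        if PySem.Str.startswith col (prefix_ ++ "_") then
          (let tail := PySem.Str.slice col (some (PySem.Str.len (prefix_ ++ "_")))
           if PySem.Str.strIsdigit tail && !(PySem.Str.pyGet? tail 0 == some '0') then
             PySem.Dict.modify d (pvIntOfDigits tail) [] (fun t => PySem.Set.add t prefix_)
           else d)
        else d) d) n []
    ↔ p ∈ PySem.Dict.getD d n [] ∨ (1 ≤ n ∧ col = p ++ "_" ++ PySem.Int.toStr n) := by
  simp only [pvPrefixes, List.foldl]
  rw [pv_step_mem, pv_step_mem, pv_step_mem, pv_step_mem]
  fin_cases hp <;> tauto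

lemma pv_outer_mem (cols : List String) (p : String) (n : Int) (hp : p ∈ pvPrefixes) :
    ∀ d : PySem.Dict Int (PySem.Set String),
    p ∈ PySem.Dict.getD
      (cols.foldl (fun d col =>
        pvPrefixes.foldl (fun d prefix_ =>
          if PySem.Str.startswith col (prefix_ ++ "_") then
            (let tail := PySem.Str.slice col (some (PySem.Str.len (prefix_ ++ "_")))
             if PySem.Str.strIsdigit tail && !(PySem.Str.pyGet? tail 0 == some '0') then
               PySem.Dict.modify d (pvIntOfDigits tail) [] (fun t => PySem.Set.add t prefix_)
             else d)
          else d) d) d) n []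
    ↔ p ∈ PySem.Dict.getD d n [] ∨ (1 ≤ n ∧ (p ++ "_" ++ PySem.Int.toStr n) ∈ cols) := by
  induction cols with
  | nil => simp
  | cons c cs ih =>
    intro d
    rw [List.foldl_cons, ih, pv_inner_mem c p n hp d, List.mem_cons]
    constructor
    · rintro ((h | ⟨hn, hc⟩) | ⟨hn, hc⟩)
      · exact Or.inl h
      · exact Or.inr ⟨hn, Or.inl hc.symm⟩
      · exact Or.inr ⟨hn, Or.inr hc⟩
    · rintro (h | ⟨hn, hc | hc⟩)
      · exact Or.inl (Or.inl h)
      · exact Or.inl (Or.inr ⟨hn, hc.symm⟩)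
      · exact Or.inr ⟨hn, hc⟩

lemma pv_index_mem (columns : List String) (p : String) (n : Int) (hp : p ∈ pvPrefixes) :
    p ∈ PySem.Dict.getD (pvBIndex columns) n []
      ↔ 1 ≤ n ∧ (p ++ "_" ++ PySem.Int.toStr n) ∈ columns := by
  rw [pvBIndex, pv_outer_mem columns p n hp PySem.Dict.empty]
  have he : PySem.Dict.getD (PySem.Dict.empty) n ([] : PySem.Set String) = [] := rfl
  rw [he]
  simp

-- ---- invariants of the parsing pass: values are nodup subsets of pvPrefixes,
-- ---- keys are nodup and at most 4 per column ----

-- proof-side name for the inner-loop body of pvBIndex (definitionally equal)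
def pvStep (col : String) (d : PySem.Dict Int (PySem.Set String)) (q : String) :
    PySem.Dict Int (PySem.Set String) :=
  if PySem.Str.startswith col (q ++ "_") then
    (let tail := PySem.Str.slice col (some (PySem.Str.len (q ++ "_")))
     if PySem.Str.strIsdigit tail && !(PySem.Str.pyGet? tail 0 == some '0') then
       PySem.Dict.modify d (pvIntOfDigits tail) [] (fun t => PySem.Set.add t q)
     else d)
  else d

lemma pvBIndex_eq (columns : List String) :
    pvBIndex columns
      = columns.foldl (fun d col => pvPrefixes.foldl (pvStep col) d) PySem.Dict.empty := rfl

def pvInv (d : PySem.Dict Int (PySem.Set String)) : Prop :=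
  ∀ m : Int, (PySem.Dict.getD d m ([] : PySem.Set String)).Nodup ∧
    ∀ x ∈ PySem.Dict.getD d m ([] : PySem.Set String), x ∈ pvPrefixes

lemma pv_step_inv (col q : String) (hq : q ∈ pvPrefixes)
    (d : PySem.Dict Int (PySem.Set String)) (h : pvInv d) : pvInv (pvStep col d q) := by
  unfold pvStep
  dsimp only
  split_ifs with h1 h2
  · intro m
    rw [PySem.Dict.getD_modify]
    split_ifs with he
    · refine ⟨PySem.Set.nodup_add _ _ (h _).1, ?_⟩
      intro x hx
      rcases (PySem.Set.mem_add _ _ _).mp hx with hx | rfl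
      · exact (h _).2 x hx
      · exact hq
    · exact h m
  · exact h
  · exact h

lemma pv_fold_inv (col : String) :
    ∀ qs : List String, (∀ q ∈ qs, q ∈ pvPrefixes) →
    ∀ d, pvInv d → pvInv (qs.foldl (pvStep col) d) := by
  intro qs
  induction qs with
  | nil => intro _ d h; exact h
  | cons q qs ih =>
    intro hqs d h
    exact ih (fun x hx => hqs x (by simp [hx]))
      (pvStep col d q) (pv_step_inv col q (hqs q (by simp)) d h)

lemma pv_index_inv (columns : List String) : pvInv (pvBIndex columns) := by
  rw [pvBIndex_eq]
  have base : pvInv PySem.Dict.empty := by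
    intro m
    exact ⟨List.nodup_nil, by intro x hx; simp at hx⟩
  induction columns using List.reverseRecOn with
  | nil => exact base
  | append_singleton cs c ih =>
    rw [List.foldl_append, List.foldl_cons, List.foldl_nil]
    exact pv_fold_inv c pvPrefixes (fun q hq => hq) _ ih

lemma pv_step_keys_nodup (col q : String) (d : PySem.Dict Int (PySem.Set String))
    (h : d.keys.Nodup) : (pvStep col d q).keys.Nodup := by
  unfold pvStep
  dsimp only
  split_ifs with h1 h2
  · rw [PySem.Dict.keys_modify]
    exact PySem.Dict.nodup_keys_insert _ _ _ h
  · exact h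
  · exact h

lemma pv_step_keys_len (col q : String) (d : PySem.Dict Int (PySem.Set String)) :
    (pvStep col d q).keys.length ≤ d.keys.length + 1 := by
  unfold pvStep
  dsimp only
  split_ifs with h1 h2
  · rw [PySem.Dict.keys_modify]
    by_cases hc : PySem.Dict.contains d (pvIntOfDigits (PySem.Str.slice col (some (PySem.Str.len (q ++ "_"))))) = true
    · rw [PySem.Dict.keys_insert_of_contains _ _ hc]
      omega
    · rw [PySem.Dict.keys_insert_of_not_contains _ _ (by simpa using hc)]
      simp
  · omega
  · omega

lemma pv_fold_keys (col : String) (d : PySem.Dict Int (PySem.Set String))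
    (h : d.keys.Nodup) :
    (pvPrefixes.foldl (pvStep col) d).keys.Nodup ∧
      (pvPrefixes.foldl (pvStep col) d).keys.length ≤ d.keys.length + 4 := by
  simp only [pvPrefixes, List.foldl]
  refine ⟨?_, ?_⟩
  · exact pv_step_keys_nodup _ _ _ (pv_step_keys_nodup _ _ _
      (pv_step_keys_nodup _ _ _ (pv_step_keys_nodup _ _ _ h)))
  · have l1 := pv_step_keys_len col "bid_px" d
    have l2 := pv_step_keys_len col "bid_sz" (pvStep col d "bid_px")
    have l3 := pv_step_keys_len col "ask_px" (pvStep col (pvStep col d "bid_px") "bid_sz")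
    have l4 := pv_step_keys_len col "ask_sz"
      (pvStep col (pvStep col (pvStep col d "bid_px") "bid_sz") "ask_px")
    omega

lemma pv_index_keys (columns : List String) :
    (pvBIndex columns).keys.Nodup ∧
      (pvBIndex columns).keys.length ≤ 4 * columns.length := by
  rw [pvBIndex_eq]
  induction columns using List.reverseRecOn with
  | nil => exact ⟨List.nodup_nil, by simp⟩
  | append_singleton cs c ih =>
    rw [List.foldl_append, List.foldl_cons, List.foldl_nil]
    obtain ⟨hnd, hlen⟩ := ih
    obtain ⟨hnd', hlen'⟩ := pv_fold_keys c _ hnd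
    refine ⟨hnd', ?_⟩
    simp only [List.length_append, List.length_cons, List.length_nil]
    omega

-- a nodup subset of the four prefixes has length 4 iff it contains all four
lemma pv_len4 (v : PySem.Set String) (hn : v.Nodup) (hs : ∀ x ∈ v, x ∈ pvPrefixes) :
    v.length = 4 ↔ ∀ p ∈ pvPrefixes, p ∈ v := by
  have hsub : v.Subperm pvPrefixes := hn.subperm hs
  constructor
  · intro hlen
    have hperm : v.Perm pvPrefixes := hsub.perm_of_length_le (by rw [hlen]; rfl)
    intro p hp
    exact hperm.mem_iff.mpr hp
  · intro hall
    have hsub' : pvPrefixes.Subperm v :=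
      (by decide : pvPrefixes.Nodup).subperm (fun x hx => hall x hx)
    have h1 := hsub.length_le
    have h2 := hsub'.length_le
    simp only [pvPrefixes, List.length_cons, List.length_nil] at h1 h2 ⊢
    omega

-- ---- the sorted list of complete levels, characterised ----

lemma pv_L_mem (columns : List String) (n : Int) :
    n ∈ pvBLevels columns
      ↔ 2 ≤ n ∧ PySem.Set.issubset
          (PySem.Set.ofList (pvPrefixes.map (fun p => p ++ "_" ++ PySem.Int.toStr n)))
          (PySem.Set.ofList columns) = true := by
  have hnd := (pv_index_keys columns).1
  have hinv := pv_index_inv columns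
  have hlen4 := pv_len4 (PySem.Dict.getD (pvBIndex columns) n []) (hinv n).1 (hinv n).2
  have hmem : (∀ p ∈ pvPrefixes, p ∈ PySem.Dict.getD (pvBIndex columns) n []) ∧ 2 ≤ n
      ↔ 2 ≤ n ∧ PySem.Set.issubset
          (PySem.Set.ofList (pvPrefixes.map (fun p => p ++ "_" ++ PySem.Int.toStr n)))
          (PySem.Set.ofList columns) = true := by
    rw [PySem.Set.issubset_iff]
    constructor
    · rintro ⟨hall, hn⟩
      refine ⟨hn, ?_⟩
      intro x hx
      rw [PySem.Set.mem_ofList] at hx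
      obtain ⟨p, hp, rfl⟩ := List.mem_map.mp hx
      rw [PySem.Set.mem_ofList]
      exact ((pv_index_mem columns p n hp).mp (hall p hp)).2
    · rintro ⟨hn, hall⟩
      refine ⟨?_, hn⟩
      intro p hp
      refine (pv_index_mem columns p n hp).mpr ⟨by omega, ?_⟩
      have := hall (p ++ "_" ++ PySem.Int.toStr n)
        (by rw [PySem.Set.mem_ofList]; exact List.mem_map_of_mem hp)
      rwa [PySem.Set.mem_ofList] at this
  rw [pvBLevels, PySem.List.mem_sorted, List.mem_map]
  constructor
  · rintro ⟨kv, hkv, rfl⟩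
    rw [List.mem_filter] at hkv
    obtain ⟨hitems, hcond⟩ := hkv
    rw [Bool.and_eq_true, decide_eq_true_eq, beq_iff_eq] at hcond
    have hget : PySem.Dict.getD (pvBIndex columns) kv.1 [] = kv.2 :=
      PySem.Dict.getD_of_mem_items _ (by exact hitems) hnd []
    rw [← hmem]
    refine ⟨fun p hp => ?_, hcond.1⟩
    have h4 : (PySem.Dict.getD (pvBIndex columns) kv.1 []).length = 4 := by
      rw [hget]; exact hcond.2
    exact (hlen4.mp h4) p hp
  · intro h
    obtain ⟨hall, hn⟩ : (∀ p ∈ pvPrefixes, p ∈ PySem.Dict.getD (pvBIndex columns) n []) ∧ 2 ≤ n :=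
      hmem.mpr h
    have hlen : (PySem.Dict.getD (pvBIndex columns) n []).length = 4 := hlen4.mpr hall
    have hne : PySem.Dict.getD (pvBIndex columns) n [] ≠ [] := by
      intro he
      rw [he] at hlen
      simp at hlen
    rw [PySem.Dict.getD_eq_get?_getD] at hlen hne
    rcases hg : PySem.Dict.get? (pvBIndex columns) n with _ | v
    · rw [hg] at hne
      simp at hne
    · rw [hg] at hlen
      refine ⟨(n, v), ?_, rfl⟩
      rw [List.mem_filter]
      refine ⟨PySem.Dict.mem_items_of_get?_eq_some _ hg, ?_⟩
      rw [Bool.and_eq_true, decide_eq_true_eq, beq_iff_eq]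
      exact ⟨hn, hlen⟩

lemma pv_L_sorted (columns : List String) : (pvBLevels columns).Pairwise (· < ·) := by
  have hnd := (pv_index_keys columns).1
  have hsub : (((PySem.Dict.items (pvBIndex columns)).filter
      (fun kv => decide (2 ≤ kv.1) && (kv.2.length == 4))).map Prod.fst).Sublist
      ((pvBIndex columns).keys) :=
    List.Sublist.map Prod.fst List.filter_sublist
  have hxs : (((PySem.Dict.items (pvBIndex columns)).filter
      (fun kv => decide (2 ≤ kv.1) && (kv.2.length == 4))).map Prod.fst).Nodup :=
    hnd.sublist hsub
  have hLnd : (pvBLevels columns).Nodup :=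
    ((PySem.List.sorted_perm _ _ _).nodup_iff).mpr hxs
  have hle : (pvBLevels columns).Pairwise (fun a b => a ≤ b) :=
    PySem.List.sorted_pairwise _ (fun x => x)
  exact (hle.and hLnd).imp (fun h => lt_of_le_of_ne h.1 h.2)

lemma pv_L_len (columns : List String) :
    (pvBLevels columns).length ≤ 4 * columns.length := by
  rw [pvBLevels, PySem.List.length_sorted]
  calc (((PySem.Dict.items (pvBIndex columns)).filter
      (fun kv => decide (2 ≤ kv.1) && (kv.2.length == 4))).map Prod.fst).length
      ≤ ((pvBIndex columns).keys).length :=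
        (List.Sublist.map Prod.fst List.filter_sublist).length_le
    _ ≤ 4 * columns.length := (pv_index_keys columns).2

-- ---- the two scans agree ----
lemma pv_scan (cset : PySem.Set String) :
    ∀ (L : List Int) (fuel : Nat) (d : Int), L.Pairwise (· < ·) →
    (∀ n : Int, n ∈ L ↔ d + 1 ≤ n ∧ PySem.Set.issubset
        (PySem.Set.ofList (pvPrefixes.map (fun p => p ++ "_" ++ PySem.Int.toStr n)))
        cset = true) →
    L.length < fuel →
    pvALoop cset d (d + 1) fuel = pvBScan L d := by
  intro L
  induction L with
  | nil =>
    intro fuel d _ hiff hfuel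
    obtain ⟨f, rfl⟩ : ∃ f, fuel = f + 1 := ⟨fuel - 1, by omega⟩
    rw [pvALoop, pvBScan]
    have hc : ¬ (PySem.Set.issubset
        (PySem.Set.ofList (pvPrefixes.map (fun p => p ++ "_" ++ PySem.Int.toStr (d+1))))
        cset = true) := by
      intro hc
      have := (hiff (d+1)).mpr ⟨le_refl _, hc⟩
      simp at this
    simp [hc]
  | cons l rest ih =>
    intro fuel d hpw hiff hfuel
    obtain ⟨f, rfl⟩ : ∃ f, fuel = f + 1 := ⟨fuel - 1, by omega⟩
    have hl : d + 1 ≤ l := ((hiff l).mp (by simp)).1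
    rw [pvALoop, pvBScan]
    by_cases he : l = d + 1
    · have hc : PySem.Set.issubset
          (PySem.Set.ofList (pvPrefixes.map (fun p => p ++ "_" ++ PySem.Int.toStr (d+1))))
          cset = true := he ▸ ((hiff l).mp (by simp)).2
      rw [if_pos hc, if_neg (by omega)]
      have hiff' : ∀ n : Int, n ∈ rest ↔ (d + 1) + 1 ≤ n ∧ PySem.Set.issubset
          (PySem.Set.ofList (pvPrefixes.map (fun p => p ++ "_" ++ PySem.Int.toStr n)))
          cset = true := by
        intro n
        constructor
        · intro hn
          have h1 := (hiff n).mp (by simp [hn])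
          have h2 : l < n := (List.pairwise_cons.mp hpw).1 n hn
          exact ⟨by omega, h1.2⟩
        · rintro ⟨hn1, hn2⟩
          have : n ∈ l :: rest := (hiff n).mpr ⟨by omega, hn2⟩
          rcases List.mem_cons.mp this with rfl | hm
          · omega
          · exact hm
      have := ih f (d+1) (List.pairwise_cons.mp hpw).2 hiff'
        (by simp at hfuel ⊢; omega)
      rw [he]
      exact this
    · have hll : d + 1 < l := by omega
      have hc : ¬ (PySem.Set.issubset
          (PySem.Set.ofList (pvPrefixes.map (fun p => p ++ "_" ++ PySem.Int.toStr (d+1))))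
          cset = true) := by
        intro hc
        have := (hiff (d+1)).mpr ⟨le_refl _, hc⟩
        rcases List.mem_cons.mp this with he' | hm
        · omega
        · have := (List.pairwise_cons.mp hpw).1 _ hm
          omega
      rw [if_neg hc, if_pos (by omega)]

-- ===== VERDICT (by name: the statement is the Claim_ definition above) =====
theorem detect_depth_levels_spec : Claim_equal_detect_depth_levels := by
  intro columns _
  unfold Spec_detect_depth_levels detect_depth_levels detect_depth_levels_alt
  have h := pv_scan (PySem.Set.ofList columns) (pvBLevels columns)
    (4 * columns.length + 1) 1 (pv_L_sorted columns)
    (fun n => by rw [pv_L_mem columns n]; norm_num)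
    (by have := pv_L_len columns; omega)
  norm_num at h
  exact h
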